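-- pv_equiv track=rewrite | github.com/sankar-vaisesika/pythonworks | codewars/only_duplicates.py | only_duplicates
-- ===== SOURCE A (Python) =====
-- def only_duplicates(st):
--
--     count={}
--     for c in st:
--         if c in count:
--             count[c]+=1
--         else:
--             count[c]=1
--
--     res=[]
--     for c in st:
--         if count[c]>1:
--             res.append(c)
--
--     return "".join(res)
-- ===== SOURCE B (Python) =====
-- def only_duplicates(st):
--     # Sort the characters: equal characters become adjacent, so the duplicated
--     # ones are exactly those with an equal neighbour in the sorted order.
--     ordered = sorted(st)
--     dup = {a for a, b in zip(ordered, ordered[1:]) if a == b}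
--     return "".join(c for c in st if c in dup)
-- ===== Notes on version B (the rewrite author's own statement) =====
-- stated objective: alternative
-- what changed: Replaces A's frequency-table build-then-filter with a counting-free sort-based algorithm: sort the characters, collect into a set the characters that have an equal adjacent neighbour in the sorted order, and keep the original characters that belong to that set.
import Mathlib
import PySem

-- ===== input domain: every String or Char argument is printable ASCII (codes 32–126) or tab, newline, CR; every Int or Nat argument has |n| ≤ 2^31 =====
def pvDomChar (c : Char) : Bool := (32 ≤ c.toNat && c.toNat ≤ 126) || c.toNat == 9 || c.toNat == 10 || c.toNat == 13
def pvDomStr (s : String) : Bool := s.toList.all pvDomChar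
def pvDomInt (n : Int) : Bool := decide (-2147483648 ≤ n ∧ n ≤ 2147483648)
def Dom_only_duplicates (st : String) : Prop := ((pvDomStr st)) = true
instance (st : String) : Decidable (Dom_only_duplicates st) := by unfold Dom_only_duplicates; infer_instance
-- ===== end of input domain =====

-- B replaces A's frequency-table build-then-filter with a counting-free sort-based algorithm:
-- sort the characters, take the set of characters with an equal adjacent neighbour in the sorted
-- order, and keep the original characters in that set (alternative decomposition, no speed claim).

-- ===== PORT A =====
-- first loop: build the frequency dict; second loop: collect chars with count > 1
def only_duplicates (st : String) : String :=
  let count : PySem.Dict Char Int :=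
    st.toList.foldl
      (fun d c => if d.contains c then d.modify c 0 (· + 1) else d.insert c 1)
      PySem.Dict.empty
  let res : List Char :=
    st.toList.foldl (fun r c => if count.getD c 0 > 1 then r ++ [c] else r) []
  String.ofList res

-- ===== PORT B =====
-- ordered = sorted(st); dup = {a for a,b in zip(ordered, ordered[1:]) if a == b};
-- join of (c for c in st if c in dup)
def only_duplicates_alt (st : String) : String :=
  let ordered : List Char := PySem.List.sorted st.toList (fun c => c) false
  let dup : PySem.Set Char :=
    PySem.Set.ofList
      (((ordered.zip ordered.tail).filter (fun ab => ab.1 == ab.2)).map (fun ab => ab.1))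
  String.ofList (st.toList.filter (fun c => PySem.Set.contains dup c))

-- ===== PRECONDITION & SPEC =====
def Spec_only_duplicates (st : String) (out : String) : Prop := out = only_duplicates_alt st
instance (st : String) (out : String) : Decidable (Spec_only_duplicates st out) := by unfold Spec_only_duplicates; infer_instance

-- ===== CLAIM (what is proved, stated in full; the proofs are below) =====
def Claim_equal_only_duplicates : Prop := ∀ (st : String), Dom_only_duplicates st → Spec_only_duplicates st (only_duplicates st)

-- ===== LEMMAS AND PROOFS =====

-- A's dict-building step acts on getD exactly like +1 at the updated key
theorem pv_step_getD (d : PySem.Dict Char Int) (c v : Char) :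
    ((if d.contains c then d.modify c 0 (· + 1) else d.insert c 1).getD v 0)
      = d.getD v 0 + (if v = c then 1 else 0) := by
  by_cases hc : d.contains c
  · by_cases hv : v = c
    · subst hv; simp [hc, PySem.Dict.getD_modify_self]
    · simp [hc, PySem.Dict.getD_modify_of_ne d 0 (· + 1) hv, hv]
  · by_cases hv : v = c
    · subst hv
      have h0 : d.getD v 0 = 0 := by
        have := (PySem.Dict.get?_eq_none_iff_contains d v).2 (by simpa using hc)
        simp [PySem.Dict.getD, this]
      simp [hc, PySem.Dict.getD_insert_self, h0]
    · simp [hc, PySem.Dict.getD_insert_of_ne d 1 0 hv, hv]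

-- the whole first loop of A computes List.count
theorem pv_counter_getD (l : List Char) (d : PySem.Dict Char Int) (v : Char) :
    ((l.foldl (fun d c => if d.contains c then d.modify c 0 (· + 1) else d.insert c 1) d).getD v 0)
      = d.getD v 0 + l.count v := by
  induction l generalizing d with
  | nil => simp
  | cons c t ih =>
      simp only [List.foldl_cons, ih, pv_step_getD, List.count_cons]
      by_cases hv : v = c
      · simp [hv]; ring
      · simp [hv]; exact fun hh => hv hh.symm

-- append-accumulator filter loop = List.filter
theorem pv_filter_loop (l : List Char) (p : Char → Prop) [DecidablePred p] (r : List Char) :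
    l.foldl (fun r c => if p c then r ++ [c] else r) r
      = r ++ l.filter (fun c => decide (p c)) := by
  induction l generalizing r with
  | nil => simp
  | cons a t ih =>
      simp only [List.foldl_cons, List.filter_cons]
      by_cases ha : p a <;> simp [ha, ih]

-- in a ≤-sorted list, an equal adjacent pair of c's exists iff c occurs at least twice
theorem pv_adj_iff_two (l : List Char) (hp : l.Pairwise (· ≤ ·)) (c : Char) :
    ((c, c) ∈ l.zip l.tail) ↔ 2 ≤ l.count c := by
  induction l with
  | nil => simp
  | cons a t ih =>
      cases t with
      | nil =>
          simp only [List.tail_cons, List.zip_nil_right, List.not_mem_nil, false_iff,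
            List.count_cons, List.count_nil, not_le]
          by_cases h : a = c <;> simp [h]
      | cons b t2 =>
          have hp' : (b :: t2).Pairwise (· ≤ ·) := hp.tail
          have hab : a ≤ b := (List.pairwise_cons.1 hp).1 b (by simp)
          simp only [List.tail_cons] at ih
          simp only [List.tail_cons, List.zip_cons_cons, List.mem_cons]
          rw [ih hp']
          constructor
          · rintro (h | h)
            · obtain ⟨h1, h2⟩ : c = a ∧ c = b := by simpa [Prod.ext_iff, eq_comm] using h
              simp only [List.count_cons, beq_iff_eq, ← h1, ← h2]
              simp
            · simp only [List.count_cons, beq_iff_eq] at h ⊢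
              split_ifs at h ⊢ <;> omega
          · intro h
            by_cases hca : c = a
            · by_cases hcb : c = b
              · left
                simp [← hca, ← hcb]
              · -- a = c ≠ b, and everything after b is ≥ b > a: c cannot recur
                exfalso
                have hnotb : c ∉ b :: t2 := by
                  intro hmem
                  rcases List.mem_cons.1 hmem with h1 | h1
                  · exact hcb h1
                  · have h3 : b ≤ c := (List.pairwise_cons.1 hp').1 c h1
                    have h5 : c ≤ b := by rw [hca]; exact hab
                    exact hcb (le_antisymm h5 h3)
                have h0 : (b :: t2).count c = 0 := List.count_eq_zero.2 hnotb
                simp only [List.count_cons, beq_iff_eq] at h h0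
                split_ifs at h h0 <;> omega
            · right
              have hac : a ≠ c := fun hh => hca hh.symm
              simp only [List.count_cons, beq_iff_eq, if_neg hac] at h
              simp only [List.count_cons, beq_iff_eq]
              split_ifs at h ⊢ <;> omega

-- membership in B's duplicate set = an adjacent equal pair in the sorted order
theorem pv_mem_dup (z : List (Char × Char)) (c : Char) :
    (c ∈ (z.filter (fun ab => ab.1 == ab.2)).map (fun ab => ab.1)) ↔ (c, c) ∈ z := by
  simp only [List.mem_map, List.mem_filter, beq_iff_eq]
  constructor
  · rintro ⟨⟨x, y⟩, ⟨hz, heq⟩, hfst⟩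
    simp only at heq hfst
    subst heq; subst hfst
    exact hz
  · intro hz
    exact ⟨(c, c), ⟨hz, rfl⟩, rfl⟩

-- ===== VERDICT (by name: the statement is the Claim_ definition above) =====
theorem only_duplicates_spec : Claim_equal_only_duplicates := by
  intro st _
  unfold Spec_only_duplicates only_duplicates only_duplicates_alt
  dsimp only
  rw [pv_filter_loop]
  simp only [List.nil_append]
  congr 1
  apply List.filter_congr
  intro c _
  have hcnt := pv_counter_getD st.toList PySem.Dict.empty c
  have hsortp : (PySem.List.sorted st.toList (fun c => c) false).Pairwise (· ≤ ·) := by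
    simpa using PySem.List.sorted_pairwise st.toList (fun c => c)
  have hperm : (PySem.List.sorted st.toList (fun c => c) false).Perm st.toList :=
    PySem.List.sorted_perm st.toList (fun c => c) false
  have hcount : (PySem.List.sorted st.toList (fun c => c) false).count c = st.toList.count c :=
    hperm.count_eq c
  have hmem : (PySem.Set.contains (PySem.Set.ofList
      ((((PySem.List.sorted st.toList (fun c => c) false).zip
          (PySem.List.sorted st.toList (fun c => c) false).tail).filter
        (fun ab => ab.1 == ab.2)).map (fun ab => ab.1))) c)
      = decide (2 ≤ st.toList.count c) := by
    rw [Bool.eq_iff_iff]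
    simp only [PySem.Set.contains, List.elem_iff, decide_eq_true_eq]
    rw [PySem.Set.mem_ofList, pv_mem_dup, pv_adj_iff_two _ hsortp, hcount]
  rw [hmem, hcnt]
  simp [PySem.Dict.empty, PySem.Dict.getD, PySem.Dict.get?]
  omega
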